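-- pv_equiv track=rewrite | github.com/amir4v/All-English-Words | A1-C2/pure/memorizing-letter-wise/app/first_letter.py | mini_letterize
-- ===== SOURCE A (Python) =====
-- import string
--
-- lower_chars = string.ascii_lowercase
--
-- def mini_letterize(word, parts=3):
--     if len(word) <= 0:
--         return ''
--
--     word = word.lower()
--     word = word.title()
--
--     if parts == 1 or '-' in word:
--         # First Letter
--         for c in lower_chars:
--                 word = word.replace(c, '')
--     elif parts in [2, 3]:
--         # Multipart
--         if parts == 2:
--             # Two
--             word = f'{word[0]}-{word[-1]}'
--         elif parts == 3:
--             # Three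
--             mid = len(word) // 2
--             word = f'{word[0]}-{word[mid]}-{word[-1]}'
--
--     return word.lower()
-- ===== SOURCE B (Python) =====
-- import string
--
-- lower_chars = string.ascii_lowercase
--
-- def mini_letterize(word, parts=3):
--     # One pass over the lowercased word; no title() pass and no 26 replace() scans.
--     if len(word) <= 0:
--         return ''
--     w = word.lower()
--     if parts == 1 or '-' in w:
--         # Initials: keep every character that starts an alphabetic run,
--         # and every non-letter character.
--         out = []
--         prev_alpha = False
--         for c in w:
--             alpha = 'a' <= c <= 'z'
--             if not alpha or not prev_alpha:
--                 out.append(c)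
--             prev_alpha = alpha
--         return ''.join(out)
--     if parts == 2:
--         return f'{w[0]}-{w[-1]}'
--     if parts == 3:
--         return f'{w[0]}-{w[len(w) // 2]}-{w[-1]}'
--     return w
-- ===== Notes on version B (the rewrite author's own statement) =====
-- stated objective: alternative
-- what changed: B drops the title() pass and the 26 whole-string replace() scans: it makes a single pass over the lowercased word keeping each character that is a non-letter or starts an alphabetic run, and builds the 2/3-part answers directly from the lowercased word instead of title-casing and re-lowering.
import Mathlib
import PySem

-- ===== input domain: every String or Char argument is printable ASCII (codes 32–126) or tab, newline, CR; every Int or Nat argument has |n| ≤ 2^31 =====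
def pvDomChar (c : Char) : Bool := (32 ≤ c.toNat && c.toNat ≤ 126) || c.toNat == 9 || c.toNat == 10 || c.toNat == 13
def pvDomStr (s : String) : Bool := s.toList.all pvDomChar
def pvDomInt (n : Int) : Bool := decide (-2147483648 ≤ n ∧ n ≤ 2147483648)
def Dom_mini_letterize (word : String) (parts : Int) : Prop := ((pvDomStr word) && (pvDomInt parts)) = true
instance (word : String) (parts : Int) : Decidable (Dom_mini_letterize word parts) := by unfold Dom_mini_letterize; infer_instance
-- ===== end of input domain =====

-- B makes one pass over the lowercased word (keeping non-letters and alphabetic run starts)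
-- instead of A's title() pass followed by 26 whole-string replace() scans; objective: alternative single-pass algorithm.

-- ===== PORT A =====

-- string.ascii_lowercase
def pvLowerChars : List Char :=
  ['a','b','c','d','e','f','g','h','i','j','k','l','m','n','o','p','q','r','s','t','u','v','w','x','y','z']

-- str.title(), hand-ported (no PySem primitive); exact on the ASCII domain, where the
-- cased characters are exactly A-Z/a-z: a cased char is titlecased after a non-cased
-- char and lowercased otherwise.
def pyTitleGo : Bool → List Char → List Char
  | _, [] => []
  | prevCased, c :: t =>
    let cased := PySem.Chars.islower c || PySem.Chars.isupper c
    (if cased then (if prevCased then PySem.Chars.lowerChar c else PySem.Chars.upperChar c) else c)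
      :: pyTitleGo cased t

def mini_letterize (word : String) (parts : Int) : String :=
  if word.toList.length ≤ 0 then "" else
    let w1 := PySem.Chars.lower word.toList          -- word = word.lower()
    let w2 := pyTitleGo false w1                     -- word = word.title()
    let w3 :=
      if parts == 1 || PySem.Chars.isIn ['-'] w2 then
        -- for c in lower_chars: word = word.replace(c, '')
        pvLowerChars.foldl (fun w c => PySem.Chars.replace w [c] []) w2
      else if [(2 : Int), 3].contains parts then
        if parts == 2 then
          -- f'{word[0]}-{word[-1]}'  (indices in range: the word is nonempty, so .toList = [c])
          (PySem.List.pyGet? w2 0).toList ++ ['-'] ++ (PySem.List.pyGet? w2 (-1)).toList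
        else if parts == 3 then
          -- mid = len(word) // 2 ; f'{word[0]}-{word[mid]}-{word[-1]}'
          let mid := PySem.Int.floordiv (w2.length : Int) 2
          (PySem.List.pyGet? w2 0).toList ++ ['-'] ++ (PySem.List.pyGet? w2 mid).toList
            ++ ['-'] ++ (PySem.List.pyGet? w2 (-1)).toList
        else w2
      else w2
    String.ofList (PySem.Chars.lower w3)                 -- return word.lower()

-- ===== PORT B =====

-- single pass: keep c when it is a non-letter or the previous char was not a letter
def altKeepGo : Bool → List Char → List Char
  | _, [] => []
  | prevAlpha, c :: t =>
    let alpha := decide ('a' ≤ c ∧ c ≤ 'z')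
    if !alpha || !prevAlpha then c :: altKeepGo alpha t else altKeepGo alpha t

def mini_letterize_alt (word : String) (parts : Int) : String :=
  if word.toList.length ≤ 0 then "" else
    let w := PySem.Chars.lower word.toList
    if parts == 1 || PySem.Chars.isIn ['-'] w then
      String.ofList (altKeepGo false w)
    else if parts == 2 then
      String.ofList ((PySem.List.pyGet? w 0).toList ++ ['-'] ++ (PySem.List.pyGet? w (-1)).toList)
    else if parts == 3 then
      String.ofList ((PySem.List.pyGet? w 0).toList ++ ['-']
        ++ (PySem.List.pyGet? w (PySem.Int.floordiv (w.length : Int) 2)).toList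
        ++ ['-'] ++ (PySem.List.pyGet? w (-1)).toList)
    else String.ofList w

-- ===== PRECONDITION & SPEC =====
def Spec_mini_letterize (word : String) (parts : Int) (out : String) : Prop := out = mini_letterize_alt word parts
instance (word : String) (parts : Int) (out : String) : Decidable (Spec_mini_letterize word parts out) := by unfold Spec_mini_letterize; infer_instance

-- ===== CLAIM (what is proved, stated in full; the proofs are below) =====
def Claim_equal_mini_letterize : Prop := ∀ (word : String) (parts : Int), Dom_mini_letterize word parts → Spec_mini_letterize word parts (mini_letterize word parts)

-- ===== LEMMAS AND PROOFS =====

theorem pvCharExt {a b : Char} (h : a.toNat = b.toNat) : a = b := by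
  apply Char.ext; exact UInt32.toNat_inj.mp h

theorem pvCharLe (a c : Char) : (a ≤ c) ↔ a.toNat ≤ c.toNat := by
  rw [Char.le_def]; exact UInt32.le_iff_toNat_le ..

theorem pvIslower (c : Char) : PySem.Chars.islower c = decide (97 ≤ c.toNat ∧ c.toNat ≤ 122) := by
  have h1 : ('a').toNat = 97 := by decide
  have h2 : ('z').toNat = 122 := by decide
  simp [PySem.Chars.islower, pvCharLe, h1, h2]

theorem pvIsupper (c : Char) : PySem.Chars.isupper c = decide (65 ≤ c.toNat ∧ c.toNat ≤ 90) := by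
  have h1 : ('A').toNat = 65 := by decide
  have h2 : ('Z').toNat = 90 := by decide
  simp [PySem.Chars.isupper, pvCharLe, h1, h2]

theorem pvOfNatToNat {n : Nat} (h : n < 55296) : (Char.ofNat n).toNat = n := by
  rw [Char.toNat_ofNat, if_pos (Or.inl h)]

theorem pvMemLower (c : Char) : c ∈ pvLowerChars ↔ (97 ≤ c.toNat ∧ c.toNat ≤ 122) := by
  constructor
  · intro h; fin_cases h <;> decide
  · rintro ⟨h1, h2⟩
    have hc : Char.ofNat c.toNat = c := Char.ofNat_toNat c
    have h0 : c.toNat ∈ List.range' 97 26 := by rw [List.mem_range'_1]; omega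
    have h3 := (by decide : ∀ n ∈ List.range' 97 26, Char.ofNat n ∈ pvLowerChars) _ h0
    rwa [hc] at h3

theorem pvContainsLower (c : Char) : pvLowerChars.contains c = PySem.Chars.islower c := by
  rw [pvIslower]
  by_cases h : 97 ≤ c.toNat ∧ c.toNat ≤ 122
  · rw [decide_eq_true h]; exact List.elem_eq_true_of_mem ((pvMemLower c).mpr h)
  · rw [decide_eq_false h]
    cases hc : pvLowerChars.contains c
    · rfl
    · exact absurd ((pvMemLower c).mp (List.mem_of_elem_eq_true hc)) h

theorem pvLowerCharNotUpper (c : Char) : PySem.Chars.isupper (PySem.Chars.lowerChar c) = false := by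
  unfold PySem.Chars.lowerChar
  by_cases h : PySem.Chars.isupper c = true
  · rw [if_pos h]
    rw [pvIsupper] at h ⊢
    have hb := of_decide_eq_true h
    have : (Char.ofNat (c.toNat + 32)).toNat = c.toNat + 32 := pvOfNatToNat (by omega)
    rw [this] at *
    exact decide_eq_false (by omega)
  · rw [if_neg h]; exact eq_false_of_ne_true h

theorem pvLowerCharOfNotUpper {c : Char} (h : PySem.Chars.isupper c = false) :
    PySem.Chars.lowerChar c = c := by
  unfold PySem.Chars.lowerChar; rw [if_neg (by simp [h])]

theorem pvUpperCharToNat {c : Char} (h : PySem.Chars.islower c = true) :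
    (PySem.Chars.upperChar c).toNat = c.toNat - 32 := by
  unfold PySem.Chars.upperChar
  rw [if_pos h]
  rw [pvIslower] at h
  have hb := of_decide_eq_true h
  exact pvOfNatToNat (by omega)

theorem pvLowerUpperChar {c : Char} (h : PySem.Chars.islower c = true) :
    PySem.Chars.lowerChar (PySem.Chars.upperChar c) = c := by
  have hlb := of_decide_eq_true ((pvIslower c).symm ▸ h)
  have ht : (PySem.Chars.upperChar c).toNat = c.toNat - 32 := pvUpperCharToNat h
  have hup : PySem.Chars.isupper (PySem.Chars.upperChar c) = true := by
    rw [pvIsupper, ht]; exact decide_eq_true (by omega)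
  unfold PySem.Chars.lowerChar
  rw [if_pos hup, ht]
  apply pvCharExt
  rw [pvOfNatToNat (by omega)]
  omega

theorem pvUpperCharNotLower {c : Char} (h : PySem.Chars.islower c = true) :
    PySem.Chars.islower (PySem.Chars.upperChar c) = false := by
  have hlb := of_decide_eq_true ((pvIslower c).symm ▸ h)
  rw [pvIslower, pvUpperCharToNat h]
  exact decide_eq_false (by omega)

-- every char of word.lower() is non-uppercase
theorem pvNoUpperLower (s : List Char) :
    ∀ c ∈ PySem.Chars.lower s, PySem.Chars.isupper c = false := by
  intro c hc
  simp only [PySem.Chars.lower, List.mem_map] at hc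
  obtain ⟨d, _, rfl⟩ := hc
  exact pvLowerCharNotUpper d

-- replace with a single-char pattern and empty replacement is a filter
theorem pvReplaceGoSingle (c : Char) :
    ∀ (l : List Char) (fuel : Nat) (acc : List Char), l.length ≤ fuel →
      PySem.Chars.replace.go [c] [] fuel l acc = acc.reverse ++ l.filter (fun x => !(x == c)) := by
  intro l
  induction l with
  | nil =>
    intro fuel acc _
    cases fuel <;> simp [PySem.Chars.replace.go]
  | cons d t ih =>
    intro fuel acc hf
    cases fuel with
    | zero => simp at hf
    | succ f =>
      rw [PySem.Chars.replace.go]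
      by_cases hdc : d = c
      · subst hdc
        have hpre : List.isPrefixOf [d] (d :: t) = true := by simp [List.isPrefixOf]
        rw [if_pos hpre]
        simp only [List.length_cons, List.length_nil, Nat.zero_add, List.drop_succ_cons,
          List.drop_zero, List.reverse_nil, List.nil_append] at *
        rw [ih f _ (by omega)]
        simp
      · have hpre : List.isPrefixOf [c] (d :: t) = false := by
          simp [List.isPrefixOf]; exact fun h => (hdc h.symm).elim
        rw [if_neg (by simp [hpre])]
        simp only [List.length_cons] at hf
        rw [ih f _ (by omega)]
        simp [hdc]

theorem pvReplaceSingle (s : List Char) (c : Char) :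
    PySem.Chars.replace s [c] [] = s.filter (fun x => !(x == c)) := by
  unfold PySem.Chars.replace
  rw [if_neg (by simp)]
  simpa using pvReplaceGoSingle c s s.length [] le_rfl

theorem pvFoldlReplace (cs : List Char) (l : List Char) :
    cs.foldl (fun w c => PySem.Chars.replace w [c] []) l = l.filter (fun x => !(cs.contains x)) := by
  induction cs generalizing l with
  | nil => simp
  | cons c cs ih =>
    simp only [List.foldl_cons]
    rw [pvReplaceSingle, ih, List.filter_filter]
    apply List.filter_congr
    intro x _
    simp only [List.contains_cons, Bool.not_or]
    exact Bool.and_comm ..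

theorem pvTitleGoLength (prev : Bool) (l : List Char) : (pyTitleGo prev l).length = l.length := by
  induction l generalizing prev with
  | nil => rfl
  | cons c t ih => simp [pyTitleGo, ih]

-- '-' survives lower/title unchanged, and no letter becomes '-'
theorem pvTitleGoDash (prev : Bool) (l : List Char) : ('-' ∈ pyTitleGo prev l) ↔ '-' ∈ l := by
  induction l generalizing prev with
  | nil => simp [pyTitleGo]
  | cons c t ih =>
    simp only [pyTitleGo, List.mem_cons, ih]
    constructor
    · rintro (h | h)
      · left
        by_cases hc : (PySem.Chars.islower c || PySem.Chars.isupper c) = true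
        · rw [if_pos hc] at h
          exfalso
          rcases Bool.or_eq_true_iff.mp hc with hl | hu
          · by_cases hp : prev
            · rw [if_pos hp, pvLowerCharOfNotUpper (by
                rw [pvIsupper]; have := of_decide_eq_true ((pvIslower c).symm ▸ hl)
                exact decide_eq_false (by omega))] at h
              have := of_decide_eq_true ((pvIslower c).symm ▸ hl)
              have hd : ('-').toNat = 45 := by decide
              have := congrArg Char.toNat h
              omega
            · rw [if_neg hp] at h
              have := pvUpperCharToNat hl
              have hlb := of_decide_eq_true ((pvIslower c).symm ▸ hl)
              have hd : ('-').toNat = 45 := by decide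
              have := congrArg Char.toNat h
              omega
          · have hub := of_decide_eq_true ((pvIsupper c).symm ▸ hu)
            have hd : ('-').toNat = 45 := by decide
            by_cases hp : prev
            · rw [if_pos hp] at h
              unfold PySem.Chars.lowerChar at h
              rw [if_pos (by rw [pvIsupper]; exact decide_eq_true hub)] at h
              have hto : (Char.ofNat (c.toNat + 32)).toNat = c.toNat + 32 := pvOfNatToNat (by omega)
              have := congrArg Char.toNat h
              omega
            · rw [if_neg hp] at h
              unfold PySem.Chars.upperChar at h
              rw [if_neg (by rw [pvIslower]; simp; omega)] at h
              have := congrArg Char.toNat h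
              omega
        · rw [if_neg hc] at h; exact h
      · right; exact h
    · rintro (h | h)
      · left
        have hc : (PySem.Chars.islower c || PySem.Chars.isupper c) = false := by
          rw [pvIslower, pvIsupper, ← h]
          decide
        rw [if_neg (by simp [hc])]; exact h
      · right; exact h

-- lower ∘ title = id on a string with no uppercase chars
theorem pvLowerTitle (prev : Bool) (l : List Char) (h : ∀ c ∈ l, PySem.Chars.isupper c = false) :
    PySem.Chars.lower (pyTitleGo prev l) = l := by
  induction l generalizing prev with
  | nil => rfl
  | cons c t ih =>
    have hc := h c (by simp)
    have ht := fun d hd => h d (List.mem_cons_of_mem c hd)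
    simp only [pyTitleGo, PySem.Chars.lower, List.map_cons]
    have := ih (PySem.Chars.islower c || PySem.Chars.isupper c) ht
    simp only [PySem.Chars.lower] at this
    rw [this]
    congr 1
    by_cases hcase : (PySem.Chars.islower c || PySem.Chars.isupper c) = true
    · rw [if_pos hcase]
      have hl : PySem.Chars.islower c = true := by
        rcases Bool.or_eq_true_iff.mp hcase with h' | h'
        · exact h'
        · rw [hc] at h'; exact absurd h' (by simp)
      by_cases hp : prev
      · rw [if_pos hp]; simp [pvLowerCharOfNotUpper hc]
      · rw [if_neg hp]; exact pvLowerUpperChar hl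
    · rw [if_neg hcase]; exact pvLowerCharOfNotUpper hc

-- the heart: A's (title → drop-lowercase → lower) is B's one-pass run-start filter
theorem pvKey (l : List Char) (h : ∀ c ∈ l, PySem.Chars.isupper c = false) (prev : Bool) :
    PySem.Chars.lower ((pyTitleGo prev l).filter (fun x => !(pvLowerChars.contains x)))
      = altKeepGo prev l := by
  induction l generalizing prev with
  | nil => rfl
  | cons c t ih =>
    have hc := h c (by simp)
    have ht := fun d hd => h d (List.mem_cons_of_mem c hd)
    have halpha : decide ('a' ≤ c ∧ c ≤ 'z') = PySem.Chars.islower c := by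
      have h1 : ('a').toNat = 97 := by decide
      have h2 : ('z').toNat = 122 := by decide
      rw [pvIslower]; simp [pvCharLe, h1, h2]
    show PySem.Chars.lower
        (List.filter (fun x => !(pvLowerChars.contains x))
          ((if (PySem.Chars.islower c || PySem.Chars.isupper c) then
              (if prev then PySem.Chars.lowerChar c else PySem.Chars.upperChar c) else c)
            :: pyTitleGo (PySem.Chars.islower c || PySem.Chars.isupper c) t))
      = if (!(decide ('a' ≤ c ∧ c ≤ 'z')) || !prev) then
          c :: altKeepGo (decide ('a' ≤ c ∧ c ≤ 'z')) t
        else altKeepGo (decide ('a' ≤ c ∧ c ≤ 'z')) t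
    rw [halpha, hc, Bool.or_false]
    by_cases hl : PySem.Chars.islower c = true
    · rw [hl, if_pos rfl]
      cases prev with
      | true =>
        rw [if_pos rfl, pvLowerCharOfNotUpper hc,
          List.filter_cons_of_neg (by rw [pvContainsLower, hl]; decide)]
        rw [if_neg (by decide)]
        exact ih ht true
      | false =>
        rw [if_neg (by simp),
          List.filter_cons_of_pos (by rw [pvContainsLower, pvUpperCharNotLower hl]; decide)]
        simp only [PySem.Chars.lower, List.map_cons, pvLowerUpperChar hl]
        rw [if_pos (by decide)]
        have := ih ht true
        simp only [PySem.Chars.lower] at this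
        rw [this]
    · have hl' : PySem.Chars.islower c = false := eq_false_of_ne_true hl
      rw [hl', if_neg (by simp),
        List.filter_cons_of_pos (by rw [pvContainsLower, hl']; decide)]
      simp only [PySem.Chars.lower, List.map_cons, pvLowerCharOfNotUpper hc]
      rw [if_pos (by simp)]
      have := ih ht false
      simp only [PySem.Chars.lower] at this
      rw [this]

theorem pvPyGetMap (xs : List Char) (f : Char → Char) (i : Int) :
    PySem.List.pyGet? (xs.map f) i = (PySem.List.pyGet? xs i).map f := by
  simp [PySem.List.pyGet?, PySem.List.pyIdx?]

-- ===== VERDICT (by name: the statement is the Claim_ definition above) =====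
theorem pvLowerAppend (a b : List Char) :
    PySem.Chars.lower (a ++ b) = PySem.Chars.lower a ++ PySem.Chars.lower b := by
  simp [PySem.Chars.lower]

theorem pvLowerDashCons (xs : List Char) :
    PySem.Chars.lower ('-' :: xs) = '-' :: PySem.Chars.lower xs := by
  simp [PySem.Chars.lower]
  decide

theorem pvLowerGetTitle (l : List Char) (h : ∀ c ∈ l, PySem.Chars.isupper c = false) (i : Int) :
    PySem.Chars.lower ((PySem.List.pyGet? (pyTitleGo false l) i).toList)
      = (PySem.List.pyGet? l i).toList := by
  have hmap : (pyTitleGo false l).map PySem.Chars.lowerChar = l := pvLowerTitle false l h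
  have := pvPyGetMap (pyTitleGo false l) PySem.Chars.lowerChar i
  rw [hmap] at this
  cases hg : PySem.List.pyGet? (pyTitleGo false l) i <;>
    rw [hg] at this <;> simp [this, PySem.Chars.lower]

theorem mini_letterize_spec : Claim_equal_mini_letterize := by
  intro word parts _
  unfold Spec_mini_letterize
  simp only [mini_letterize, mini_letterize_alt]
  by_cases hw : word.toList.length ≤ 0
  · rw [if_pos hw, if_pos hw]
  · rw [if_neg hw, if_neg hw]
    have hno : ∀ c ∈ PySem.Chars.lower word.toList, PySem.Chars.isupper c = false :=
      pvNoUpperLower word.toList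
    have hdash : PySem.Chars.isIn ['-'] (pyTitleGo false (PySem.Chars.lower word.toList))
        = PySem.Chars.isIn ['-'] (PySem.Chars.lower word.toList) := by
      have h1 : PySem.Chars.isIn ['-'] (pyTitleGo false (PySem.Chars.lower word.toList)) = true
          ↔ '-' ∈ pyTitleGo false (PySem.Chars.lower word.toList) := by
        rw [PySem.Chars.isIn_iff_infix, List.singleton_infix_iff]
      have h2 : PySem.Chars.isIn ['-'] (PySem.Chars.lower word.toList) = true
          ↔ '-' ∈ PySem.Chars.lower word.toList := by
        rw [PySem.Chars.isIn_iff_infix, List.singleton_infix_iff]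
      cases hcase : PySem.Chars.isIn ['-'] (PySem.Chars.lower word.toList)
      · cases hcase' : PySem.Chars.isIn ['-'] (pyTitleGo false (PySem.Chars.lower word.toList))
        · rfl
        · exfalso
          have := (pvTitleGoDash false _).mp (h1.mp hcase')
          rw [h2.mpr this] at hcase
          simp at hcase
      · exact h1.mpr ((pvTitleGoDash false _).mpr (h2.mp hcase))
    rw [hdash]
    by_cases h1 : (parts == 1 || PySem.Chars.isIn ['-'] (PySem.Chars.lower word.toList)) = true
    · rw [if_pos h1, if_pos h1, pvFoldlReplace]
      exact congrArg String.ofList (pvKey _ hno false)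
    · rw [if_neg h1, if_neg h1]
      have hlen : (pyTitleGo false (PySem.Chars.lower word.toList)).length
          = (PySem.Chars.lower word.toList).length := pvTitleGoLength ..
      have hdashc : PySem.Chars.lower ['-'] = ['-'] := by decide
      by_cases h2 : parts = 2
      · subst h2
        norm_num
        rw [pvLowerAppend, pvLowerDashCons, pvLowerGetTitle _ hno, pvLowerGetTitle _ hno]
        simp [String.ofList_append]
      · by_cases h3 : parts = 3
        · subst h3
          norm_num [hlen]
          rw [pvLowerAppend, pvLowerDashCons, pvLowerAppend, pvLowerDashCons,
            pvLowerGetTitle _ hno, pvLowerGetTitle _ hno, pvLowerGetTitle _ hno]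
          simp [String.ofList_append]
        · have e2 : (parts == 2) = false := by simp [h2]
          have e3 : (parts == 3) = false := by simp [h3]
          have ec : ([(2 : Int), 3].contains parts) = false := by
            simp [h2, h3]
          rw [if_neg (by rw [ec]; decide), if_neg (by rw [e2]; decide), if_neg (by rw [e3]; decide)]
          exact congrArg String.ofList (pvLowerTitle false _ hno)
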